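-- pv_equiv track=rewrite | github.com/Pwnafication/Runescape-Services | Leetcode/Yihuan/Graphs/DFS_adjacency_list_traversal_graph.py | traversal_dfs
-- ===== SOURCE A (Python) =====
-- def traversal_dfs(matrix,vertex,values,seen):
--     values.append(vertex)
--     seen.add(vertex)
--
--     row = matrix[vertex]
--     for colIndex, colValue in enumerate(row):
--         if colValue == 1 and colIndex not in seen:
--             traversal_dfs(matrix,colIndex,values,seen)
--
--     return values
-- ===== SOURCE B (Python) =====
-- def traversal_dfs(matrix, vertex, values, seen):
--     # Iterative DFS with an explicit stack of (vertex, next-column-index) frames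
--     # emulating the call stack; same in-place mutation of values and seen.
--     values.append(vertex)
--     seen.add(vertex)
--     stack = [(vertex, 0)]
--     while stack:
--         v, i = stack[-1]
--         row = matrix[v]
--         if i < len(row):
--             stack[-1] = (v, i + 1)
--             if row[i] == 1 and i not in seen:
--                 values.append(i)
--                 seen.add(i)
--                 stack.append((i, 0))
--         else:
--             stack.pop()
--     return values
-- ===== Notes on version B (the rewrite author's own statement) =====
-- stated objective: alternative
-- what changed: Recursive DFS is replaced by an iterative loop over an explicit stack of (vertex, next-column-index) frames that emulates the call stack; same preorder, same in-place mutation of values and seen.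
-- outside the precondition, e.g. on traversal_dfs([[0], [0, 1, 1]], 0, [], set()): A returns [0], B returns [0]
import Mathlib
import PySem

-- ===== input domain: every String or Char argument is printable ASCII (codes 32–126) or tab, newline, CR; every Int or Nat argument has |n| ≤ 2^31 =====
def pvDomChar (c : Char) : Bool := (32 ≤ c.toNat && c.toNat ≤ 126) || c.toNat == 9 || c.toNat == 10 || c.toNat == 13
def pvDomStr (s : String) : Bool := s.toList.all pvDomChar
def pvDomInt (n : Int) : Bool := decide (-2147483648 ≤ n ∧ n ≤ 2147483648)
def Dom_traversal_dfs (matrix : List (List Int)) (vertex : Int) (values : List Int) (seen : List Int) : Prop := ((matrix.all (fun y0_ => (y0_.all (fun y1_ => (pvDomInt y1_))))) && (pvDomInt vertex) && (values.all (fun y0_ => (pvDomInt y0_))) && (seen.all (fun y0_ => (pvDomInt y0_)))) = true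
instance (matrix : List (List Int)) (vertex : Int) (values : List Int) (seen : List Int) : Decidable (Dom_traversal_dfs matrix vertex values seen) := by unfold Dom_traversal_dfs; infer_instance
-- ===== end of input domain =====

-- B replaces the recursive DFS by an explicit stack of (vertex, next-column-index) frames
-- (alternative decomposition, same cost); equivalence is about the RETURN value — both
-- Pythons also mutate `values`/`seen` in place, identically.

-- ===== PORT A =====
mutual
def dfsA (matrix : List (List Int)) (fuel : Nat) (vertex : Int) (values : List Int) (seen : PySem.Set Int) : List Int × PySem.Set Int :=
  match fuel with
  | 0 => (values, seen)
  | f + 1 =>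
    let values1 := values ++ [vertex]
    let seen1 := PySem.Set.add seen vertex
    match PySem.List.pyGet? matrix vertex with
    | none => (values1, seen1)   -- IndexError in Python; outside Pre_
    | some row => rowA matrix f row 0 values1 seen1
termination_by (fuel, 0)

def rowA (matrix : List (List Int)) (fuel : Nat) (suffix : List Int) (i : Nat) (values : List Int) (seen : PySem.Set Int) : List Int × PySem.Set Int :=
  match suffix with
  | [] => (values, seen)
  | c :: rest =>
    if c = 1 ∧ PySem.Set.contains seen (i : Int) = false then
      let p := dfsA matrix fuel (i : Int) values seen
      rowA matrix fuel rest (i + 1) p.1 p.2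
    else
      rowA matrix fuel rest (i + 1) values seen
termination_by (fuel, suffix.length + 1)
end

def traversal_dfs (matrix : List (List Int)) (vertex : Int) (values : List Int) (seen : List Int) : List Int :=
  (dfsA matrix (matrix.length + 1) vertex values (PySem.Set.ofList seen)).1

-- ===== PORT B =====
def loopB (matrix : List (List Int)) (fuel : Nat) (stack : List (Int × Nat)) (values : List Int) (seen : PySem.Set Int) : List Int :=
  match fuel with
  | 0 => values
  | f + 1 =>
    match stack with
    | [] => values
    | (v, i) :: rest =>
      match PySem.List.pyGet? matrix v with
      | none => values   -- IndexError in Python; outside Pre_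
      | some row =>
        if i < row.length then
          if row.getD i 0 = 1 ∧ PySem.Set.contains seen (i : Int) = false then
            loopB matrix f (((i : Int), 0) :: (v, i + 1) :: rest) (values ++ [(i : Int)]) (PySem.Set.add seen (i : Int))
          else
            loopB matrix f ((v, i + 1) :: rest) values seen
        else
          loopB matrix f rest values seen

def traversal_dfs_alt (matrix : List (List Int)) (vertex : Int) (values : List Int) (seen : List Int) : List Int :=
  loopB matrix ((matrix.length + 1) * ((matrix.map List.length).foldl max 0 + 2) + 1)
    [(vertex, 0)] (values ++ [vertex]) (PySem.Set.add (PySem.Set.ofList seen) vertex)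

-- ===== PRECONDITION & SPEC =====
-- Every adjacency entry equal to 1 must point at a column index that is itself a row of
-- the matrix: otherwise a recursive matrix[colIndex] would raise IndexError.
def InvM (matrix : List (List Int)) : Prop :=
  ∀ row ∈ matrix, ∀ i : Nat, i < row.length → row.getD i 0 = 1 → i < matrix.length

-- Pre_ excludes the inputs on which Python A raises IndexError (vertex out of range, or a
-- reachable 1-entry whose column is not a row index).  The row condition InvM quantifies over
-- ALL rows, so it also excludes some inputs on which A returns because the offending 1-entry
-- is never reached (unreachable row, or its column already in seen) — see the cite.
def Pre_traversal_dfs (matrix : List (List Int)) (vertex : Int) (values : List Int) (seen : List Int) : Prop :=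
  (-(matrix.length : Int) ≤ vertex ∧ vertex < (matrix.length : Int)) ∧ InvM matrix

instance (matrix : List (List Int)) (vertex : Int) (values : List Int) (seen : List Int) : Decidable (Pre_traversal_dfs matrix vertex values seen) := by
  unfold Pre_traversal_dfs InvM; infer_instance

def pvWitness_traversal_dfs : List (List Int) × Int × List Int × List Int := ([[0, 1], [1, 0]], 0, [], [])

def Spec_traversal_dfs (matrix : List (List Int)) (vertex : Int) (values : List Int) (seen : List Int) (out : List Int) : Prop := out = traversal_dfs_alt matrix vertex values seen
instance (matrix : List (List Int)) (vertex : Int) (values : List Int) (seen : List Int) (out : List Int) : Decidable (Spec_traversal_dfs matrix vertex values seen out) := by unfold Spec_traversal_dfs; infer_instance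

-- ===== CLAIM (what is proved, stated in full; the proofs are below) =====
def Claim_equal_traversal_dfs : Prop := ∀ (matrix : List (List Int)) (vertex : Int) (values : List Int) (seen : List Int), Dom_traversal_dfs matrix vertex values seen → Pre_traversal_dfs matrix vertex values seen → Spec_traversal_dfs matrix vertex values seen (traversal_dfs matrix vertex values seen)

-- ===== LEMMAS AND PROOFS =====

-- proof-only measures
def rowLenM (matrix : List (List Int)) (v : Int) : Nat := ((PySem.List.pyGet? matrix v).getD []).length
def maxRowM (matrix : List (List Int)) : Nat := (matrix.map List.length).foldl max 0
def framecost (matrix : List (List Int)) (p : Int × Nat) : Nat := rowLenM matrix p.1 + 1 - p.2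
def newCount (matrix : List (List Int)) (seen : PySem.Set Int) : Nat :=
  ((Finset.range matrix.length).filter (fun (j : Nat) => PySem.Set.contains seen ((j : Int)) = false)).card
def penalty (matrix : List (List Int)) (seen : PySem.Set Int) : Nat :=
  newCount matrix seen * (maxRowM matrix + 2)
def Bmeas (matrix : List (List Int)) (stack : List (Int × Nat)) (seen : PySem.Set Int) : Nat :=
  (stack.map (framecost matrix)).sum + penalty matrix seen
def StackValid (matrix : List (List Int)) (stack : List (Int × Nat)) : Prop :=
  ∀ p ∈ stack, ∃ row, PySem.List.pyGet? matrix p.1 = some row ∧ p.2 ≤ row.length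

theorem le_foldl_max (l : List Nat) (a b : Nat) (h : b ∈ l ∨ b ≤ a) : b ≤ l.foldl max a := by
  induction l generalizing a with
  | nil => simpa using h
  | cons x xs ih =>
    apply ih
    rcases h with h | h
    · rcases List.mem_cons.1 h with h | h
      · right; simp [h]
      · left; exact h
    · right; exact le_trans h (le_max_left _ _)

theorem rowLen_le_maxRow (matrix : List (List Int)) (v : Int) : rowLenM matrix v ≤ maxRowM matrix := by
  unfold rowLenM maxRowM
  cases h : PySem.List.pyGet? matrix v with
  | none => simp
  | some row =>
    have hm : row ∈ matrix := PySem.List.mem_of_pyGet?_eq_some matrix h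
    exact le_foldl_max _ _ _ (Or.inl (List.mem_map_of_mem hm))

theorem newCount_le (matrix : List (List Int)) (seen : PySem.Set Int) : newCount matrix seen ≤ matrix.length := by
  unfold newCount
  exact le_trans (Finset.card_filter_le _ _) (by simp)

theorem newCount_mono (matrix : List (List Int)) (s t : PySem.Set Int)
    (h : ∀ x, x ∈ s → x ∈ t) : newCount matrix t ≤ newCount matrix s := by
  unfold newCount
  apply Finset.card_le_card
  intro j hj
  simp only [Finset.mem_filter] at hj ⊢
  refine ⟨hj.1, ?_⟩
  cases hc : PySem.Set.contains s ((j : Int)) with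
  | false => rfl
  | true =>
    have : ((j : Int)) ∈ t := h _ ((PySem.Set.contains_iff _ _).1 hc)
    have := (PySem.Set.contains_iff _ _).2 this
    rw [this] at hj
    exact absurd hj.2 (by simp)

theorem mem_filter_fresh (matrix : List (List Int)) (seen : PySem.Set Int) (i : Nat)
    (hn : i < matrix.length) (hf : PySem.Set.contains seen ((i : Int)) = false) :
    i ∈ (Finset.range matrix.length).filter (fun (j : Nat) => PySem.Set.contains seen ((j : Int)) = false) := by
  exact Finset.mem_filter.2 ⟨Finset.mem_range.2 hn, hf⟩

theorem newCount_add_fresh (matrix : List (List Int)) (seen : PySem.Set Int) (i : Nat)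
    (hn : i < matrix.length) (hf : PySem.Set.contains seen ((i : Int)) = false) :
    newCount matrix (PySem.Set.add seen ((i : Int))) + 1 = newCount matrix seen := by
  unfold newCount
  have hset : (Finset.range matrix.length).filter (fun (j : Nat) => PySem.Set.contains (PySem.Set.add seen ((i : Int))) ((j : Int)) = false)
      = ((Finset.range matrix.length).filter (fun (j : Nat) => PySem.Set.contains seen ((j : Int)) = false)).erase i := by
    ext j
    simp only [Finset.mem_erase, Finset.mem_filter]
    constructor
    · intro ⟨hjr, hjc⟩
      have hnotmem : ¬ ((j : Int)) ∈ PySem.Set.add seen ((i : Int)) := by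
        intro hmem; have := (PySem.Set.contains_iff _ _).2 hmem; rw [this] at hjc; exact absurd hjc (by simp)
      rw [PySem.Set.mem_add] at hnotmem
      push Not at hnotmem
      refine ⟨?_, hjr, ?_⟩
      · intro hji; exact hnotmem.2 (by rw [hji])
      · cases hc : PySem.Set.contains seen ((j : Int)) with
        | false => rfl
        | true => exact absurd ((PySem.Set.contains_iff _ _).1 hc) hnotmem.1
    · intro ⟨hji, hjr, hjc⟩
      refine ⟨hjr, ?_⟩
      cases hc : PySem.Set.contains (PySem.Set.add seen ((i : Int))) ((j : Int)) with
      | false => rfl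
      | true =>
        have := (PySem.Set.contains_iff _ _).1 hc
        rw [PySem.Set.mem_add] at this
        rcases this with h | h
        · have := (PySem.Set.contains_iff _ _).2 h; rw [this] at hjc; exact absurd hjc (by simp)
        · exact absurd (by exact_mod_cast h) hji
  rw [hset, Finset.card_erase_of_mem (mem_filter_fresh matrix seen i hn hf)]
  have hpos : 0 < ((Finset.range matrix.length).filter (fun (j : Nat) => PySem.Set.contains seen ((j : Int)) = false)).card :=
    Finset.card_pos.2 ⟨i, mem_filter_fresh matrix seen i hn hf⟩
  omega

theorem seen_mono_row_aux (matrix : List (List Int)) (fA : Nat)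
    (hd : ∀ (v : Int) values seen x, x ∈ seen → x ∈ (dfsA matrix fA v values seen).2) :
    ∀ (suffix : List Int) (i : Nat) values seen x, x ∈ seen → x ∈ (rowA matrix fA suffix i values seen).2 := by
  intro suffix
  induction suffix with
  | nil => intro i values seen x hx; simpa [rowA] using hx
  | cons c rest ih =>
    intro i values seen x hx
    rw [rowA]
    split
    · exact ih _ _ _ _ (hd _ _ _ _ hx)
    · exact ih _ _ _ _ hx

theorem seen_mono_dfs (matrix : List (List Int)) :
    ∀ (fA : Nat) (v : Int) values seen x, x ∈ seen → x ∈ (dfsA matrix fA v values seen).2 := by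
  intro fA
  induction fA with
  | zero => intro v values seen x hx; simpa [dfsA] using hx
  | succ f ih =>
    intro v values seen x hx
    rw [dfsA]
    cases h : PySem.List.pyGet? matrix v with
    | none => simpa [PySem.Set.mem_add] using Or.inl hx
    | some row =>
      exact seen_mono_row_aux matrix f ih row 0 _ _ x (by simp [PySem.Set.mem_add, hx])

theorem loopB_nil (matrix : List (List Int)) (f : Nat) (values : List Int) (seen : PySem.Set Int) :
    loopB matrix f [] values seen = values := by
  cases f <;> simp [loopB]

theorem loopB_fuel (matrix : List (List Int)) (hInv : InvM matrix) :
    ∀ f1 f2 stack values seen, StackValid matrix stack →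
      Bmeas matrix stack seen ≤ f1 → Bmeas matrix stack seen ≤ f2 →
      loopB matrix f1 stack values seen = loopB matrix f2 stack values seen := by
  intro f1
  induction f1 with
  | zero =>
    intro f2 stack values seen hSV h1 h2
    cases stack with
    | nil => rw [loopB_nil, loopB_nil]
    | cons p rest =>
      exfalso
      obtain ⟨row, hg, hle⟩ := hSV p (List.mem_cons_self ..)
      have hg' : PySem.List.pyGet? matrix p.1 = some row := hg
      have hrl : rowLenM matrix p.1 = row.length := by simp [rowLenM, hg']
      simp only [Bmeas, framecost, List.map_cons, List.sum_cons] at h1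
      rw [hrl] at h1
      omega
  | succ g ih =>
    intro f2 stack values seen hSV h1 h2
    cases stack with
    | nil => rw [loopB_nil, loopB_nil]
    | cons p rest =>
      obtain ⟨v, i⟩ := p
      obtain ⟨row, hg, hle⟩ := hSV (v, i) (List.mem_cons_self ..)
      have hg' : PySem.List.pyGet? matrix v = some row := hg
      have hle' : i ≤ row.length := hle
      have hrl : rowLenM matrix v = row.length := by simp [rowLenM, hg']
      have hSVrest : StackValid matrix rest := fun q hq => hSV q (List.mem_cons_of_mem _ hq)
      obtain ⟨g2, rfl⟩ : ∃ g2, f2 = g2 + 1 := by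
        have h1' := h1
        simp only [Bmeas, framecost, List.map_cons, List.sum_cons] at h1'
        rw [hrl] at h1'
        cases f2 with
        | zero =>
          exfalso
          simp only [Bmeas, framecost, List.map_cons, List.sum_cons] at h2
          rw [hrl] at h2
          omega
        | succ k => exact ⟨k, rfl⟩
      simp only [loopB, hg']
      by_cases hlt : i < row.length
      · simp only [if_pos hlt]
        by_cases hc : row.getD i 0 = 1 ∧ PySem.Set.contains seen ((i : Int)) = false
        · simp only [if_pos hc]
          have hmem : row ∈ matrix := PySem.List.mem_of_pyGet?_eq_some matrix hg'
          have hin : i < matrix.length := hInv row hmem i hlt hc.1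
          have hgi : PySem.List.pyGet? matrix ((i : Int)) = some matrix[i] := by
            rw [PySem.List.pyGet?_natCast]; simp [List.getElem?_eq_getElem hin]
          have hrli : rowLenM matrix ((i : Int)) = matrix[i].length := by simp [rowLenM, hgi]
          have hrlM : rowLenM matrix ((i : Int)) ≤ maxRowM matrix := rowLen_le_maxRow matrix ((i : Int))
          have hpen : penalty matrix (PySem.Set.add seen ((i : Int))) + (maxRowM matrix + 2) = penalty matrix seen := by
            unfold penalty
            rw [← newCount_add_fresh matrix seen i hin hc.2]
            ring
          have hSVnew : StackValid matrix (((i : Int), 0) :: (v, i + 1) :: rest) := by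
            intro q hq
            rcases List.mem_cons.1 hq with rfl | hq
            · exact ⟨matrix[i], hgi, by simp⟩
            · rcases List.mem_cons.1 hq with rfl | hq
              · exact ⟨row, hg', hlt⟩
              · exact hSVrest q hq
          apply ih _ _ _ _ hSVnew
          all_goals
            simp only [Bmeas, framecost, List.map_cons, List.sum_cons] at h1 h2 ⊢
            rw [hrl] at h1 h2
            rw [hrl, hrli] at *
            rw [← hrli] at *
            omega
        · simp only [if_neg hc]
          have hSVnew : StackValid matrix ((v, i + 1) :: rest) := by
            intro q hq
            rcases List.mem_cons.1 hq with rfl | hq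
            · exact ⟨row, hg', hlt⟩
            · exact hSVrest q hq
          apply ih _ _ _ _ hSVnew
          all_goals
            simp only [Bmeas, framecost, List.map_cons, List.sum_cons] at h1 h2 ⊢
            rw [hrl] at h1 h2 ⊢
            omega
      · simp only [if_neg hlt]
        apply ih _ _ _ _ hSVrest
        all_goals
          simp only [Bmeas, framecost, List.map_cons, List.sum_cons] at h1 h2 ⊢
          rw [hrl] at h1 h2
          omega

theorem simRow_aux (matrix : List (List Int)) (hInv : InvM matrix) (fA : Nat)
    (hdfs : ∀ (v : Int) values seen rest fB fB',
      (PySem.List.pyGet? matrix v).isSome = true →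
      StackValid matrix rest →
      newCount matrix (PySem.Set.add seen v) + 1 ≤ fA →
      Bmeas matrix ((v, 0) :: rest) (PySem.Set.add seen v) ≤ fB →
      Bmeas matrix rest (dfsA matrix fA v values seen).2 ≤ fB' →
      loopB matrix fB ((v, 0) :: rest) (values ++ [v]) (PySem.Set.add seen v)
        = loopB matrix fB' rest (dfsA matrix fA v values seen).1 (dfsA matrix fA v values seen).2) :
    ∀ (suffix : List Int) (i : Nat) (v : Int) (row : List Int) rest values seen fB fB',
      PySem.List.pyGet? matrix v = some row →
      row.drop i = suffix →
      i ≤ row.length →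
      StackValid matrix rest →
      newCount matrix seen ≤ fA →
      Bmeas matrix ((v, i) :: rest) seen ≤ fB →
      Bmeas matrix rest (rowA matrix fA suffix i values seen).2 ≤ fB' →
      loopB matrix fB ((v, i) :: rest) values seen
        = loopB matrix fB' rest (rowA matrix fA suffix i values seen).1 (rowA matrix fA suffix i values seen).2 := by
  intro suffix
  induction suffix with
  | nil =>
    intro i v row rest values seen fB fB' hg hdrop hile hSV hfa hB hB'
    have hieq : i = row.length := by
      have := List.drop_eq_nil_iff.1 hdrop
      omega
    have hrl : rowLenM matrix v = row.length := by simp [rowLenM, hg]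
    obtain ⟨fb, rfl⟩ : ∃ fb, fB = fb + 1 := by
      cases fB with
      | zero =>
        exfalso
        simp only [Bmeas, framecost, List.map_cons, List.sum_cons] at hB
        rw [hrl] at hB
        omega
      | succ k => exact ⟨k, rfl⟩
    simp only [loopB, hg]
    simp only [hieq, lt_self_iff_false, if_false]
    rw [rowA]
    apply loopB_fuel matrix hInv fb fB' rest values seen hSV
    · simp only [Bmeas, framecost, List.map_cons, List.sum_cons] at hB ⊢
      rw [hrl, hieq] at hB
      omega
    · simpa [rowA] using hB'
  | cons c rest' ihs =>
    intro i v row rest values seen fB fB' hg hdrop hile hSV hfa hB hB'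
    have hlt : i < row.length := by
      by_contra h
      rw [List.drop_eq_nil_iff.2 (by omega)] at hdrop
      exact List.cons_ne_nil _ _ hdrop.symm
    have hgetc : row.getD i 0 = c := by
      have h0 : (row.drop i)[0]? = some c := by rw [hdrop]; rfl
      rw [List.getElem?_drop] at h0
      simp only [Nat.add_zero] at h0
      simp [List.getD, h0]
    have hdrop' : row.drop (i + 1) = rest' := by
      have h1 : row.drop (i + 1) = (row.drop i).drop 1 := by rw [List.drop_drop]
      rw [h1, hdrop]; rfl
    have hrl : rowLenM matrix v = row.length := by simp [rowLenM, hg]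
    obtain ⟨fb, rfl⟩ : ∃ fb, fB = fb + 1 := by
      cases fB with
      | zero =>
        exfalso
        simp only [Bmeas, framecost, List.map_cons, List.sum_cons] at hB
        rw [hrl] at hB
        omega
      | succ k => exact ⟨k, rfl⟩
    simp only [loopB, hg]
    simp only [if_pos hlt, hgetc]
    by_cases hc : c = 1 ∧ PySem.Set.contains seen ((i : Int)) = false
    · simp only [if_pos hc]
      have hrw : rowA matrix fA (c :: rest') i values seen
          = rowA matrix fA rest' (i + 1) (dfsA matrix fA ((i : Int)) values seen).1 (dfsA matrix fA ((i : Int)) values seen).2 := by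
        rw [rowA]; simp only [if_pos hc]
      rw [hrw] at hB' ⊢
      have hmem : row ∈ matrix := PySem.List.mem_of_pyGet?_eq_some matrix hg
      have hin : i < matrix.length := hInv row hmem i hlt (by rw [hgetc]; exact hc.1)
      have hgi : PySem.List.pyGet? matrix ((i : Int)) = some matrix[i] := by
        rw [PySem.List.pyGet?_natCast]; simp [List.getElem?_eq_getElem hin]
      have hrli : rowLenM matrix ((i : Int)) = matrix[i].length := by simp [rowLenM, hgi]
      have hrlM : rowLenM matrix ((i : Int)) ≤ maxRowM matrix := rowLen_le_maxRow matrix ((i : Int))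
      have hpen : penalty matrix (PySem.Set.add seen ((i : Int))) + (maxRowM matrix + 2) = penalty matrix seen := by
        unfold penalty
        rw [← newCount_add_fresh matrix seen i hin hc.2]
        ring
      have hSV' : StackValid matrix ((v, i + 1) :: rest) := by
        intro q hq
        rcases List.mem_cons.1 hq with rfl | hq
        · exact ⟨row, hg, hlt⟩
        · exact hSV q hq
      have step1 : loopB matrix fb (((i : Int), 0) :: (v, i + 1) :: rest) (values ++ [((i : Int))]) (PySem.Set.add seen ((i : Int)))
          = loopB matrix (Bmeas matrix ((v, i + 1) :: rest) (dfsA matrix fA ((i : Int)) values seen).2) ((v, i + 1) :: rest)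
              (dfsA matrix fA ((i : Int)) values seen).1 (dfsA matrix fA ((i : Int)) values seen).2 := by
        apply hdfs ((i : Int)) values seen ((v, i + 1) :: rest) fb _ (by rw [hgi]; rfl) hSV'
        · have := newCount_add_fresh matrix seen i hin hc.2
          omega
        · simp only [Bmeas, framecost, List.map_cons, List.sum_cons] at hB ⊢
          rw [hrl] at hB
          rw [hrl, hrli] at *
          rw [← hrli] at *
          omega
        · exact le_refl _
      have hmono : newCount matrix (dfsA matrix fA ((i : Int)) values seen).2 ≤ newCount matrix seen := by
        apply newCount_mono
        intro x hx
        exact seen_mono_dfs matrix fA ((i : Int)) values seen x hx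
      have step2 := ihs (i + 1) v row rest (dfsA matrix fA ((i : Int)) values seen).1
          (dfsA matrix fA ((i : Int)) values seen).2
          (Bmeas matrix ((v, i + 1) :: rest) (dfsA matrix fA ((i : Int)) values seen).2) fB'
          hg hdrop' (by omega) hSV (by omega) (le_refl _) hB'
      rw [step1, step2]
    · simp only [if_neg hc]
      have hrw : rowA matrix fA (c :: rest') i values seen = rowA matrix fA rest' (i + 1) values seen := by
        rw [rowA]; simp only [if_neg hc]
      rw [hrw] at hB' ⊢
      apply ihs (i + 1) v row rest values seen fb fB' hg hdrop' (by omega) hSV hfa _ hB'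
      simp only [Bmeas, framecost, List.map_cons, List.sum_cons] at hB ⊢
      rw [hrl] at hB ⊢
      omega

theorem sim (matrix : List (List Int)) (hInv : InvM matrix) :
    ∀ (fA : Nat) (v : Int) values seen rest fB fB',
      (PySem.List.pyGet? matrix v).isSome = true →
      StackValid matrix rest →
      newCount matrix (PySem.Set.add seen v) + 1 ≤ fA →
      Bmeas matrix ((v, 0) :: rest) (PySem.Set.add seen v) ≤ fB →
      Bmeas matrix rest (dfsA matrix fA v values seen).2 ≤ fB' →
      loopB matrix fB ((v, 0) :: rest) (values ++ [v]) (PySem.Set.add seen v)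
        = loopB matrix fB' rest (dfsA matrix fA v values seen).1 (dfsA matrix fA v values seen).2 := by
  intro fA
  induction fA with
  | zero => intro v values seen rest fB fB' _ _ hcap _ _; exfalso; omega
  | succ g ih =>
    intro v values seen rest fB fB' hsome hSV hcap hB hB'
    obtain ⟨row, hg⟩ : ∃ row, PySem.List.pyGet? matrix v = some row := by
      cases h : PySem.List.pyGet? matrix v with
      | none => rw [h] at hsome; exact absurd hsome (by simp)
      | some r => exact ⟨r, rfl⟩
    have hunf : dfsA matrix (g + 1) v values seen = rowA matrix g row 0 (values ++ [v]) (PySem.Set.add seen v) := by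
      rw [dfsA, hg]
    rw [hunf] at hB' ⊢
    exact simRow_aux matrix hInv g ih row 0 v row rest (values ++ [v]) (PySem.Set.add seen v) fB fB' hg (by simp) (by omega) hSV (by omega) hB hB'

-- ===== VERDICT (by name: the statement is the Claim_ definition above) =====
theorem pre_isSome (matrix : List (List Int)) (vertex : Int)
    (hlo : -(matrix.length : Int) ≤ vertex) (hhi : vertex < (matrix.length : Int)) :
    (PySem.List.pyGet? matrix vertex).isSome = true := by
  cases h : PySem.List.pyGet? matrix vertex with
  | some r => rfl
  | none =>
    rw [PySem.List.pyGet?_eq_none_iff] at h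
    exact absurd (by simp [PySem.Raise.InRange]; omega) h

theorem traversal_dfs_spec : Claim_equal_traversal_dfs := by
  intro matrix vertex values seen _ hPre
  obtain ⟨⟨hlo, hhi⟩, hInv⟩ := hPre
  unfold Spec_traversal_dfs traversal_dfs traversal_dfs_alt
  have hsome := pre_isSome matrix vertex hlo hhi
  have hM : (matrix.map List.length).foldl max 0 = maxRowM matrix := rfl
  rw [hM]
  have hcap : newCount matrix (PySem.Set.add (PySem.Set.ofList seen) vertex) + 1 ≤ matrix.length + 1 := by
    have := newCount_le matrix (PySem.Set.add (PySem.Set.ofList seen) vertex)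
    omega
  have hmul : newCount matrix (PySem.Set.add (PySem.Set.ofList seen) vertex) * (maxRowM matrix + 2)
      ≤ matrix.length * (maxRowM matrix + 2) :=
    Nat.mul_le_mul_right _ (newCount_le matrix _)
  have hexp : (matrix.length + 1) * (maxRowM matrix + 2) = matrix.length * (maxRowM matrix + 2) + (maxRowM matrix + 2) := by ring
  have hB : Bmeas matrix [(vertex, 0)] (PySem.Set.add (PySem.Set.ofList seen) vertex)
      ≤ (matrix.length + 1) * (maxRowM matrix + 2) + 1 := by
    have hrlM := rowLen_le_maxRow matrix vertex
    simp only [Bmeas, framecost, penalty, List.map_cons, List.map_nil, List.sum_cons, List.sum_nil]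
    omega
  have hsim := sim matrix hInv (matrix.length + 1) vertex values (PySem.Set.ofList seen) []
      ((matrix.length + 1) * (maxRowM matrix + 2) + 1)
      (Bmeas matrix [] (dfsA matrix (matrix.length + 1) vertex values (PySem.Set.ofList seen)).2)
      hsome (by intro q hq; cases hq) hcap hB (le_refl _)
  rw [hsim, loopB_nil]
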